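-- pv_equiv track=rewrite | github.com/koybasimuhittin/cmpe300_hw1 | 2021400162.py | CmpeAlgorithm
-- ===== SOURCE A (Python) =====
-- def CmpeAlgorithm(arr):
--     n = len(arr)
--     res = 1
--     for i in range(n):
--         if arr[i] == 'c':
--             for j in range(n, 0, -1):
--                 k = i + n
--                 for y in range(0, n, j):
--                     k -= 1
--                 res += k
--         elif arr[i] == 'm':
--             z = 1
--             while z < n:
--                 z *= 2
--                 res += z
--         elif arr[i] == 'p':
--             w = n
--             res -= 1
--             while w > 0:
--                 w //= 5
--                 res += 1
--         elif arr[i] == 'e':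
--             for m in range(1, i + 1):
--                 p = m
--                 for l in range(m, n + 1):
--                     for t in range(n, 0, -1):
--                         p += t
--                     res += p
--     return res  # Return the result
-- ===== SOURCE B (Python) =====
-- def CmpeAlgorithm(arr):
--     n = len(arr)
--     T = n * (n + 1) // 2                      # sum 1..n
--     S = sum(-(-n // j) for j in range(1, n + 1))   # sum of ceil(n/j)
--     m_contrib = 0                             # hoisted: doubling sum, computed once
--     z = 1
--     while z < n:
--         z *= 2
--         m_contrib += z
--     p_contrib = -1                            # hoisted: base-5 digit count minus 1
--     w = n
--     while w > 0:
--         w //= 5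
--         p_contrib += 1
--     res = 1
--     for i, ch in enumerate(arr):
--         if ch == 'c':
--             res += n * (i + n) - S
--         elif ch == 'm':
--             res += m_contrib
--         elif ch == 'p':
--             res += p_contrib
--         elif ch == 'e':
--             for m in range(1, i + 1):
--                 L = n - m + 1
--                 res += L * m + T * (L * (L + 1) // 2)
--     return res
-- ===== Notes on version B (the rewrite author's own statement) =====
-- stated objective: faster
-- what changed: Replaces A's per-character nested loops (quartic in total) by one O(n) pre-pass computing the ceil-division sum, the doubling total and the base-5 digit count once, plus a single pass that uses closed-form triangular-number arithmetic for the two branches with index-dependent nested loops.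
import Mathlib
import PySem

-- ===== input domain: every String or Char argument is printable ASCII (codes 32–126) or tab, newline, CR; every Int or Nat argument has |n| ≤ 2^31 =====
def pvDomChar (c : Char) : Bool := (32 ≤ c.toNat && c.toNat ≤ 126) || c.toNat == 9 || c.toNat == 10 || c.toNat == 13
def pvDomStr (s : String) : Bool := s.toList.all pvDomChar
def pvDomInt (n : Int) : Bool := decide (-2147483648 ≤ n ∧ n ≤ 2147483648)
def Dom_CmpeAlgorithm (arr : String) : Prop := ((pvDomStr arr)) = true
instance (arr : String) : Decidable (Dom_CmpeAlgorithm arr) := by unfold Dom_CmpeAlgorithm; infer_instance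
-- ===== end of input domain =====

-- B replaces A's O(n^4) nested loops by hoisted once-computed quantities and per-character
-- closed-form arithmetic (ceil-division sum, triangular numbers): one O(n) pre-pass + one pass.

-- ===== PORT A =====
-- 'while z < n: z *= 2; res += z' — returns the total added; fuel = n bounds the ≤ log2 n iterations
def mLoop (fuel : Nat) (n z : Int) : Int :=
  match fuel with
  | 0 => 0
  | f + 1 => if z < n then 2 * z + mLoop f n (2 * z) else 0

-- 'while w > 0: w //= 5; res += 1' — returns the number of iterations
def pLoop (w : Nat) : Int :=
  if h : 0 < w then 1 + pLoop (w / 5) else 0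
termination_by w
decreasing_by exact Nat.div_lt_self h (by norm_num)

def CmpeAlgorithm (arr : String) : Int :=
  let s := arr.toList
  let n := s.length
  (PySem.List.enumerate s 0).foldl (fun res ic =>
    if ic.2 = 'c' then
      (PySem.List.pyRange (n : Int) 0 (-1)).foldl (fun res j =>
        res + (PySem.List.pyRange 0 (n : Int) j).foldl (fun k _ => k - 1) (ic.1 + (n : Int))) res
    else if ic.2 = 'm' then res + mLoop n (n : Int) 1
    else if ic.2 = 'p' then (res - 1) + pLoop n
    else if ic.2 = 'e' then
      (PySem.List.pyRange 1 (ic.1 + 1) 1).foldl (fun res m =>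
        ((PySem.List.pyRange m ((n : Int) + 1) 1).foldl (fun pr _l =>
          let p := (PySem.List.pyRange (n : Int) 0 (-1)).foldl (fun p t => p + t) pr.1
          (p, pr.2 + p)) (m, res)).2) res
    else res) 1

-- ===== PORT B =====
def CmpeAlgorithm_alt (arr : String) : Int :=
  let s := arr.toList
  let n := s.length
  let N : Int := (n : Int)
  let T : Int := PySem.Int.floordiv (N * (N + 1)) 2
  let S : Int := (PySem.List.pyRange 1 (N + 1) 1).foldl
    (fun acc j => acc + (-(PySem.Int.floordiv (-N) j))) 0
  let mC : Int := mLoop n N 1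
  let pC : Int := -1 + pLoop n
  (PySem.List.enumerate s 0).foldl (fun res ic =>
    if ic.2 = 'c' then res + (N * (ic.1 + N) - S)
    else if ic.2 = 'm' then res + mC
    else if ic.2 = 'p' then res + pC
    else if ic.2 = 'e' then
      (PySem.List.pyRange 1 (ic.1 + 1) 1).foldl (fun res m =>
        let L := N - m + 1
        res + (L * m + T * PySem.Int.floordiv (L * (L + 1)) 2)) res
    else res) 1

-- ===== PRECONDITION & SPEC =====
def Spec_CmpeAlgorithm (arr : String) (out : Int) : Prop := out = CmpeAlgorithm_alt arr
instance (arr : String) (out : Int) : Decidable (Spec_CmpeAlgorithm arr out) := by unfold Spec_CmpeAlgorithm; infer_instance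

-- ===== CLAIM (what is proved, stated in full; the proofs are below) =====
def Claim_equal_CmpeAlgorithm : Prop := ∀ (arr : String), Dom_CmpeAlgorithm arr → Spec_CmpeAlgorithm arr (CmpeAlgorithm arr)

-- ===== LEMMAS AND PROOFS =====

-- decrementing fold = subtract length
theorem pv_dec_fold (xs : List Int) (k0 : Int) :
    xs.foldl (fun k _ => k - 1) k0 = k0 - xs.length := by
  induction xs generalizing k0 with
  | nil => simp
  | cons x t ih => simp [List.foldl, ih]; ring

-- length of range(0, n, j) = ceil(n/j) = -((-n)//j), for j > 0
theorem pv_cnt_eq (n : Nat) (j : Int) (hj : 0 < j) :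
    ((PySem.List.pyRange 0 (n : Int) j).length : Int) = -(PySem.Int.floordiv (-(n : Int)) j) := by
  rw [PySem.List.pyRange_of_pos _ _ hj]
  simp only [List.length_map, List.length_range]
  by_cases h : (0 : Int) < (n : Int)
  · rw [if_pos h]
    have hq : -(PySem.Int.floordiv (-(n : Int)) j) = ((n : Int) - 0 + j - 1) / j := by
      rw [PySem.Int.neg_floordiv_neg_eq_iff_of_pos hj]
      constructor
      · have := Int.ediv_mul_le ((n : Int) - 0 + j - 1) (ne_of_gt hj)
        nlinarith [this]
      · have := Int.lt_ediv_add_one_mul_self ((n : Int) - 0 + j - 1) hj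
        nlinarith [this]
    rw [hq]
    exact Int.toNat_of_nonneg (Int.ediv_nonneg (by omega) (le_of_lt hj))
  · rw [if_neg h]
    have : (n : Int) = 0 := by omega
    rw [this]
    simp [PySem.Int.floordiv]

-- Gauss: twice the sum of range(1, n+1) is n(n+1)
theorem pv_gauss (n : Nat) :
    (PySem.List.pyRange 1 ((n : Int) + 1) 1).sum * 2 = (n : Int) * ((n : Int) + 1) := by
  induction n with
  | zero => simp [PySem.List.pyRange_one_eq_nil]
  | succ k ih =>
    have hc : (((k + 1 : Nat) : Int) + 1) = ((k : Int) + 1) + 1 := by push_cast; ring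
    rw [hc, PySem.List.pyRange_one_succ_right (by omega), List.sum_append]
    push_cast
    simp only [List.sum_cons, List.sum_nil]
    ring_nf
    ring_nf at ih
    linarith

def pv_tri (L : Nat) : Int := ((L * (L + 1)) / 2 : Nat)

theorem pv_two_tri (L : Nat) : 2 * pv_tri L = (L : Int) * ((L : Int) + 1) := by
  have h : 2 * (L * (L + 1) / 2) = L * (L + 1) :=
    Nat.mul_div_cancel' ((Nat.even_mul_succ_self L).two_dvd)
  unfold pv_tri
  exact_mod_cast congrArg (Nat.cast : Nat → Int) h

theorem pv_tri_succ (L : Nat) : pv_tri (L + 1) = pv_tri L + ((L : Int) + 1) := by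
  have h1 := pv_two_tri (L + 1)
  have h2 := pv_two_tri L
  push_cast at h1
  nlinarith [h1, h2]

-- the l-loop of the 'e' branch in closed form
theorem pv_lfold (Ts : Int) (xs : List Int) : ∀ p0 r0 : Int,
    xs.foldl (fun pr (_ : Int) => (pr.1 + Ts, pr.2 + (pr.1 + Ts))) (p0, r0)
      = (p0 + xs.length * Ts, r0 + xs.length * p0 + Ts * pv_tri xs.length) := by
  induction xs with
  | nil => intro p0 r0; simp [pv_tri]
  | cons x t ih =>
    intro p0 r0
    simp only [List.foldl_cons, List.length_cons]
    rw [ih]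
    rw [pv_tri_succ t.length]
    simp only [Prod.mk.injEq]
    refine ⟨by push_cast; ring, by push_cast; ring⟩

-- the 'c' branch equals its closed form n*(i+n) - S
theorem pv_c_branch (n : Nat) (i res : Int) :
    (PySem.List.pyRange (n : Int) 0 (-1)).foldl (fun res j =>
      res + (PySem.List.pyRange 0 (n : Int) j).foldl (fun k _ => k - 1) (i + (n : Int))) res
    = res + ((n : Int) * (i + (n : Int)) -
        (PySem.List.pyRange 1 ((n : Int) + 1) 1).foldl
          (fun acc j => acc + (-(PySem.Int.floordiv (-(n : Int)) j))) 0) := by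
  simp only [pv_dec_fold]
  rw [PySem.List.foldl_add _ (fun j => (i + (n : Int)) - ((PySem.List.pyRange 0 (n : Int) j).length : Int))]
  rw [PySem.List.foldl_add _ (fun j => -(PySem.Int.floordiv (-(n : Int)) j))]
  rw [PySem.List.pyRange_neg_one_eq_reverse, List.map_reverse, List.sum_reverse]
  have h01 : ((0 : Int) + 1) = 1 := by norm_num
  rw [h01]
  have hmap : (PySem.List.pyRange 1 ((n : Int) + 1) 1).map
      (fun j => (i + (n : Int)) - ((PySem.List.pyRange 0 (n : Int) j).length : Int))
    = (PySem.List.pyRange 1 ((n : Int) + 1) 1).map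
      (fun j => (i + (n : Int)) + PySem.Int.floordiv (-(n : Int)) j) := by
    apply List.map_congr_left
    intro j hj
    rw [PySem.List.mem_pyRange_one] at hj
    rw [pv_cnt_eq n j (by omega)]
    ring
  rw [hmap, PySem.List.sum_map_add_int, PySem.List.sum_map_const_int,
    PySem.List.length_pyRange_one]
  have hlen : ((((n : Int) + 1 - 1).toNat : Int)) = (n : Int) := by omega
  rw [hlen]
  have hneg : ((PySem.List.pyRange 1 ((n : Int) + 1) 1).map
      (fun j => -(PySem.Int.floordiv (-(n : Int)) j))).sum
    = -(((PySem.List.pyRange 1 ((n : Int) + 1) 1).map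
      (fun j => PySem.Int.floordiv (-(n : Int)) j)).sum) := by
    induction PySem.List.pyRange 1 ((n : Int) + 1) 1 with
    | nil => simp
    | cons x t ih => simp [ih]; ring
  rw [hneg]
  ring

-- sum of the countdown t-loop: p + (1 + 2 + … + n)
theorem pv_tfold (n : Nat) (p : Int) :
    (PySem.List.pyRange (n : Int) 0 (-1)).foldl (fun p t => p + t) p
      = p + (PySem.List.pyRange 1 ((n : Int) + 1) 1).sum := by
  rw [PySem.List.foldl_add _ (fun t => t)]
  rw [PySem.List.pyRange_neg_one_eq_reverse, List.map_reverse, List.sum_reverse]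
  have h01 : ((0 : Int) + 1) = 1 := by norm_num
  rw [h01]
  simp

-- T = n(n+1)//2 equals the t-loop's total
theorem pv_T_eq (n : Nat) :
    PySem.Int.floordiv ((n : Int) * ((n : Int) + 1)) 2
      = (PySem.List.pyRange 1 ((n : Int) + 1) 1).sum := by
  rw [PySem.Int.floordiv_eq_ediv_of_pos (by norm_num)]
  rw [← pv_gauss n]
  exact Int.mul_ediv_cancel _ (by norm_num)

-- the 'e' branch: A's triple loop = B's per-m closed form, for i < n
theorem pv_e_branch (n : Nat) (i : Int) (hi : i < (n : Int)) (res : Int) :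
    (PySem.List.pyRange 1 (i + 1) 1).foldl (fun res m =>
      ((PySem.List.pyRange m ((n : Int) + 1) 1).foldl (fun pr (_ : Int) =>
        ((PySem.List.pyRange (n : Int) 0 (-1)).foldl (fun p t => p + t) pr.1,
         pr.2 + (PySem.List.pyRange (n : Int) 0 (-1)).foldl (fun p t => p + t) pr.1))
        (m, res)).2) res
    = (PySem.List.pyRange 1 (i + 1) 1).foldl (fun res m =>
        res + (((n : Int) - m + 1) * m +
          PySem.Int.floordiv ((n : Int) * ((n : Int) + 1)) 2 *
          PySem.Int.floordiv (((n : Int) - m + 1) * (((n : Int) - m + 1) + 1)) 2)) res := by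
  apply PySem.List.foldl_congr_mem'
  intro m hm res'
  rw [PySem.List.mem_pyRange_one] at hm
  have hmn : m ≤ (n : Int) := by omega
  set Ts := (PySem.List.pyRange 1 ((n : Int) + 1) 1).sum with hTs
  have hstep : (fun (pr : Int × Int) (_ : Int) =>
      ((PySem.List.pyRange (n : Int) 0 (-1)).foldl (fun p t => p + t) pr.1,
       pr.2 + (PySem.List.pyRange (n : Int) 0 (-1)).foldl (fun p t => p + t) pr.1))
    = (fun pr _ => (pr.1 + Ts, pr.2 + (pr.1 + Ts))) := by
    funext pr l
    rw [pv_tfold]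
  rw [hstep, pv_lfold]
  have hL : ((PySem.List.pyRange m ((n : Int) + 1) 1).length : Int) = (n : Int) - m + 1 := by
    rw [PySem.List.length_pyRange_one]; omega
  have hfd : PySem.Int.floordiv (((n : Int) - m + 1) * (((n : Int) - m + 1) + 1)) 2
      = pv_tri (PySem.List.pyRange m ((n : Int) + 1) 1).length := by
    rw [PySem.Int.floordiv_eq_ediv_of_pos (by norm_num)]
    rw [← hL, ← pv_two_tri]
    exact Int.mul_ediv_cancel_left _ (by norm_num)
  rw [pv_T_eq n, hfd]
  simp only []
  rw [hL]
  ring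

theorem pv_main (arr : String) : CmpeAlgorithm arr = CmpeAlgorithm_alt arr := by
  simp only [CmpeAlgorithm, CmpeAlgorithm_alt]
  apply PySem.List.foldl_congr_mem'
  intro ic hic res
  rw [PySem.List.mem_enumerate_iff] at hic
  obtain ⟨k, hk, rfl⟩ := hic
  simp only
  by_cases h1 : arr.toList[k] = 'c'
  · simp only [h1, if_pos]
    exact pv_c_branch arr.toList.length (0 + (k : Int)) res
  · rw [if_neg h1, if_neg h1]
    by_cases h2 : arr.toList[k] = 'm'
    · rw [if_pos h2, if_pos h2]
    · rw [if_neg h2, if_neg h2]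
      by_cases h3 : arr.toList[k] = 'p'
      · rw [if_pos h3, if_pos h3]; ring
      · rw [if_neg h3, if_neg h3]
        by_cases h4 : arr.toList[k] = 'e'
        · rw [if_pos h4, if_pos h4]
          exact pv_e_branch arr.toList.length (0 + (k : Int))
            (by simpa using Int.ofNat_lt.mpr hk) res
        · rw [if_neg h4, if_neg h4]

-- ===== VERDICT (by name: the statement is the Claim_ definition above) =====
theorem CmpeAlgorithm_spec : Claim_equal_CmpeAlgorithm := by
  intro arr _
  unfold Spec_CmpeAlgorithm
  exact pv_main arr
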